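-- pv_equiv track=rewrite | github.com/mmk150/AdventOfCode | AoC 2022/puzzle8b.py | perimeterFill
-- ===== SOURCE A (Python) =====
-- import copy
--
-- def perimeterFill(array1):
--     # copies array1's perimeter to array2
--     length = len(array1)
--     width = len(array1[0])
--     temp = copy.deepcopy(array1)
--     for i in range(length):
--         for j in range(width):
--             if i == 0 or i == length - 1:
--                 temp[i][j] = 0
--             if j == 0 or j == width - 1:
--                 temp[i][j] = 0
--     return temp
-- ===== SOURCE B (Python) =====
-- import copy
--
-- def perimeterFill(array1):
--     # zero only the border: replace the first and last rows, then blank the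
--     # end cells of each interior row
--     temp = copy.deepcopy(array1)
--     temp[0] = [0] * len(temp[0])
--     temp[-1] = [0] * len(temp[-1])
--     for row in temp[1:-1]:
--         row[0] = 0
--         row[-1] = 0
--     return temp
-- ===== Notes on version B (the rewrite author's own statement) =====
-- stated objective: simpler
-- what changed: zeroes only the border (replaces the first and last rows wholesale, then one pass over the interior rows blanking their two end cells) instead of scanning every cell with per-cell branch tests; Pre_ excludes ragged arrays, where A's behaviour (raising on short rows, zeroing column len(array1[0])-1 and keeping longer rows' tails) is an artefact of indexing by the first row's width, and zero-width arrays with interior rows, where B's border loop raises while A returns the unchanged copy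
-- outside the precondition, e.g. on perimeterFill([[1, 2], [3, 4, 5]]): A returns [[0, 0], [0, 0, 5]], B returns [[0, 0], [0, 0, 0]]; on perimeterFill([[], [], []]): A returns [[], [], []], B raises IndexError
import Mathlib
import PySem

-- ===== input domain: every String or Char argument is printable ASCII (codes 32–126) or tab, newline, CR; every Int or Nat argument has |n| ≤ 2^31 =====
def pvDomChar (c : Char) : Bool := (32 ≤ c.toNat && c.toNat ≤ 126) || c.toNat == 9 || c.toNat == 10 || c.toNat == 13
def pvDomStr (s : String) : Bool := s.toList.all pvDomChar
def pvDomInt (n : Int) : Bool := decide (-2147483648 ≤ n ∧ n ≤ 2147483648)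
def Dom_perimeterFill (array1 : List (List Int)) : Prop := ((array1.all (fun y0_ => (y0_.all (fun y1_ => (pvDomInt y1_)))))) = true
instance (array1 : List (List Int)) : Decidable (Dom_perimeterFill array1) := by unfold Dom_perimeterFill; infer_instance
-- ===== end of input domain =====

-- B zeroes only the border of the copied grid (replace first/last row, blank each
-- interior row's end cells) instead of A's all-cells scan (objective: simpler).
-- Equivalence is about the return value; both return a fresh copy.

-- ===== PORT A =====
-- temp[i][j] = 0 on a list of lists (exact while i and j are in range, which Pre_ guarantees)
def pvSetIJ (t : List (List Int)) (i j : Nat) (v : Int) : List (List Int) :=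
  t.set i ((t.getD i []).set j v)

-- the body of A's `for j in range(width)` loop, for fixed i
def pvInnerLoop (length width i : Nat) (temp : List (List Int)) : List (List Int) :=
  (List.range width).foldl (fun temp j =>
    let temp := if i = 0 ∨ i = length - 1 then pvSetIJ temp i j 0 else temp
    if j = 0 ∨ j = width - 1 then pvSetIJ temp i j 0 else temp) temp

def perimeterFill (array1 : List (List Int)) : List (List Int) :=
  let length := array1.length
  -- len(array1[0]); headD is exact because Pre_ requires array1 ≠ []
  let width := (array1.headD []).length
  (List.range length).foldl (fun temp i => pvInnerLoop length width i temp) array1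

-- ===== PORT B =====
-- row[0] = 0; row[-1] = 0 (exact while the row is nonempty, which Pre_ guarantees)
def pvSetEnds (row : List Int) : List Int :=
  (row.set 0 0).set (row.length - 1) 0

def perimeterFill_alt (array1 : List (List Int)) : List (List Int) :=
  let temp := array1
  -- temp[0] = [0] * len(temp[0]); temp[-1] = [0] * len(temp[-1])  (in range by Pre_)
  let temp := temp.set 0 (List.replicate (temp.getD 0 []).length 0)
  let temp := temp.set (temp.length - 1) (List.replicate (temp.getD (temp.length - 1) []).length 0)
  -- `for row in temp[1:-1]` mutates temp's rows through slice aliasing;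
  -- ported as an indexed update over the interior indices 1 .. len-2
  (List.range' 1 (temp.length - 2)).foldl (fun t i => t.set i (pvSetEnds (t.getD i []))) temp

-- ===== PRECONDITION & SPEC =====
-- Pre_ excludes (a) the empty list, where A raises IndexError at array1[0]; (b) ragged arrays,
-- where A's behaviour (IndexError on rows shorter than len(array1[0]), zeroing column
-- len(array1[0])-1 and keeping longer rows' tails) is an artefact of indexing by the first
-- row's width; (c) zero-width arrays with interior rows, where B's border loop raises.
def Pre_perimeterFill (array1 : List (List Int)) : Prop :=
  array1 ≠ [] ∧ (∀ row ∈ array1, row.length = (array1.headD []).length) ∧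
    (1 ≤ (array1.headD []).length ∨ array1.length ≤ 2)
instance (array1 : List (List Int)) : Decidable (Pre_perimeterFill array1) := by
  unfold Pre_perimeterFill; infer_instance

def pvWitness_perimeterFill : List (List Int) := [[1, 2, 3], [4, 5, 6], [7, 8, 9]]

def Spec_perimeterFill (array1 : List (List Int)) (out : List (List Int)) : Prop := out = perimeterFill_alt array1
instance (array1 : List (List Int)) (out : List (List Int)) : Decidable (Spec_perimeterFill array1 out) := by unfold Spec_perimeterFill; infer_instance

-- ===== CLAIM (what is proved, stated in full; the proofs are below) =====
def Claim_equal_perimeterFill : Prop := ∀ (array1 : List (List Int)), Dom_perimeterFill array1 → Pre_perimeterFill array1 → Spec_perimeterFill array1 (perimeterFill array1)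

-- ===== LEMMAS AND PROOFS =====

-- what A's inner loop does to row i, expressed on the row alone
def pvRowF (length width i : Nat) (row : List Int) : List Int :=
  if i = 0 ∨ i = length - 1 then
    (List.range width).foldl (fun r j => r.set j 0) row
  else
    (List.range width).foldl (fun r j => if j = 0 ∨ j = width - 1 then r.set j 0 else r) row

-- a foldl preserving an invariant may have its step replaced under that invariant
theorem pv_foldl_congr_inv {α β : Type} (P : β → Prop) (f g : β → α → β)
    (hP : ∀ b a, P b → P (f b a)) (hfg : ∀ b a, P b → f b a = g b a) :
    ∀ (js : List α) (b : β), P b → js.foldl f b = js.foldl g b := by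
  intro js
  induction js with
  | nil => intro b _; rfl
  | cons j rest ih =>
    intro b hb
    simp only [List.foldl_cons]
    rw [← hfg b j hb, ih (f b j) (hP b j hb)]

-- a fold that only ever rewrites row i equals a set of row i with a row-level fold
theorem pv_inner_extract (i : Nat) (C : Nat → Prop) [DecidablePred C]
    (F : List Int → Nat → List Int) :
    ∀ (js : List Nat) (temp : List (List Int)), i < temp.length →
      js.foldl (fun t j => if C j then t.set i (F (t.getD i []) j) else t) temp
        = temp.set i (js.foldl (fun r j => if C j then F r j else r) (temp.getD i [])) := by
  intro js
  induction js with
  | nil =>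
    intro temp hi
    simp only [List.foldl_nil]
    rw [List.getD_eq_getElem _ _ hi, List.set_getElem_self]
  | cons j rest ih =>
    intro temp hi
    by_cases hc : C j
    · simp only [List.foldl_cons, if_pos hc]
      rw [ih (temp.set i (F (temp.getD i []) j)) (by simpa using hi)]
      rw [List.set_set]
      have hgd : (temp.set i (F (temp.getD i []) j)).getD i [] = F (temp.getD i []) j := by
        simp [List.getD, hi]
      rw [hgd]
    · simp only [List.foldl_cons, if_neg hc]
      exact ih temp hi

-- for i in range, A's inner loop is a set of row i with pvRowF applied to it
theorem pv_innerLoop_eq (length width i : Nat) (temp : List (List Int)) (hi : i < temp.length) :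
    pvInnerLoop length width i temp = temp.set i (pvRowF length width i (temp.getD i [])) := by
  unfold pvInnerLoop pvRowF
  by_cases hb : i = 0 ∨ i = length - 1
  · simp only [if_pos hb]
    have hstep : ∀ (t : List (List Int)) (j : Nat), i < t.length →
        (if j = 0 ∨ j = width - 1 then pvSetIJ (pvSetIJ t i j 0) i j 0 else pvSetIJ t i j 0)
          = pvSetIJ t i j 0 := by
      intro t j hit
      split_ifs with h
      · unfold pvSetIJ
        rw [List.set_set]
        have hgd : (t.set i ((t.getD i []).set j 0)).getD i [] = (t.getD i []).set j 0 := by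
          simp [List.getD, hit]
        rw [hgd, List.set_set]
      · rfl
    rw [pv_foldl_congr_inv (fun t => i < t.length)
          (fun t j => if j = 0 ∨ j = width - 1 then pvSetIJ (pvSetIJ t i j 0) i j 0 else pvSetIJ t i j 0)
          (fun t j => pvSetIJ t i j 0)
          (by intro t j h; dsimp only; split_ifs <;> simpa [pvSetIJ] using h)
          (by intro t j h; dsimp only; exact hstep t j h) _ temp hi]
    have := pv_inner_extract i (fun _ => True) (fun r j => r.set j 0) (List.range width) temp hi
    simpa [pvSetIJ] using this
  · simp only [if_neg hb]
    have := pv_inner_extract i (fun j => j = 0 ∨ j = width - 1) (fun r j => r.set j 0)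
      (List.range width) temp hi
    simpa [pvSetIJ] using this

-- pointwise description of A's outer loop
theorem pv_outer_getElem (length width : Nat) :
    ∀ (js : List Nat), js.Nodup → ∀ (temp : List (List Int)),
      (∀ i ∈ js, i < temp.length) → ∀ (k : Nat),
      (js.foldl (fun t i => pvInnerLoop length width i t) temp)[k]?
        = if k ∈ js then temp[k]?.map (pvRowF length width k) else temp[k]? := by
  intro js
  induction js with
  | nil => intro _ temp _ k; simp
  | cons i rest ih =>
    intro hnd temp hlen k
    have hi : i < temp.length := hlen i (by simp)
    have hstep := pv_innerLoop_eq length width i temp hi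
    simp only [List.foldl_cons, hstep]
    have hlen' : ∀ x ∈ rest, x < (temp.set i (pvRowF length width i (temp.getD i []))).length := by
      intro x hx; simpa using hlen x (by simp [hx])
    rw [ih (List.nodup_cons.mp hnd).2 _ hlen' k]
    by_cases hk : k = i
    · subst hk
      have hknr : k ∉ rest := (List.nodup_cons.mp hnd).1
      simp only [if_neg hknr, List.mem_cons, true_or, if_pos trivial]
      rw [List.getElem?_set_self']
      rw [List.getD_eq_getElem _ _ hi]
      simp [List.getElem?_eq_getElem hi]
    · rw [List.getElem?_set_ne (by omega)]
      by_cases hr : k ∈ rest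
      · simp [hr]
      · simp [hr, hk]

-- pointwise description of B's interior loop (a fold of row-level set-updates)
theorem pv_setfold_getElem (F : Nat → List Int → List Int) :
    ∀ (js : List Nat), js.Nodup → ∀ (temp : List (List Int)),
      (∀ i ∈ js, i < temp.length) → ∀ (k : Nat),
      (js.foldl (fun t i => t.set i (F i (t.getD i []))) temp)[k]?
        = if k ∈ js then temp[k]?.map (F k) else temp[k]? := by
  intro js
  induction js with
  | nil => intro _ temp _ k; simp
  | cons i rest ih =>
    intro hnd temp hlen k
    have hi : i < temp.length := hlen i (by simp)
    simp only [List.foldl_cons]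
    have hlen' : ∀ x ∈ rest, x < (temp.set i (F i (temp.getD i []))).length := by
      intro x hx; simpa using hlen x (by simp [hx])
    rw [ih (List.nodup_cons.mp hnd).2 _ hlen' k]
    by_cases hk : k = i
    · subst hk
      have hknr : k ∉ rest := (List.nodup_cons.mp hnd).1
      simp only [if_neg hknr, List.mem_cons, true_or, if_pos trivial]
      rw [List.getElem?_set_self']
      rw [List.getD_eq_getElem _ _ hi]
      simp [List.getElem?_eq_getElem hi]
    · rw [List.getElem?_set_ne (by omega)]
      by_cases hr : k ∈ rest
      · simp [hr]
      · simp [hr, hk]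

-- A's zeroing loop on a border row yields replicate ++ tail
theorem pv_zeroFold (row : List Int) :
    ∀ w : Nat, w ≤ row.length →
      (List.range w).foldl (fun r j => r.set j 0) row = List.replicate w 0 ++ row.drop w := by
  intro w
  induction w with
  | zero => intro _; simp
  | succ w ih =>
    intro hw
    rw [List.range_succ, List.foldl_append, ih (by omega)]
    simp only [List.foldl_cons, List.foldl_nil]
    rw [List.set_append_right _ _ (by simp)]
    simp [List.replicate_succ']
    have hd := List.drop_eq_getElem_cons (show w < row.length by omega) (l := row)
    rw [hd, List.set_cons_zero]

-- A's column-0/width-1 loop on an interior row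
theorem pv_interiorFold (width : Nat) (row : List Int) :
    ∀ w : Nat,
      (List.range w).foldl (fun r j => if j = 0 ∨ j = width - 1 then r.set j 0 else r) row
        = if w = 0 then row
          else if width - 1 < w then (row.set 0 0).set (width - 1) 0 else row.set 0 0 := by
  intro w
  induction w with
  | zero => simp
  | succ w ih =>
    rw [List.range_succ, List.foldl_append, ih]
    simp only [List.foldl_cons, List.foldl_nil]
    split_ifs <;> first | rfl | omega | simp_all [List.set_set]

-- ===== VERDICT (by name: the statement is the Claim_ definition above) =====
theorem perimeterFill_spec : Claim_equal_perimeterFill := by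
  intro a _ hpre
  obtain ⟨hne, hrect, hw1⟩ := hpre
  unfold Spec_perimeterFill perimeterFill perimeterFill_alt
  simp only []
  have hgd0 : a.getD 0 [] = a.headD [] := by
    cases a with
    | nil => exact absurd rfl hne
    | cons x t => rfl
  rw [hgd0]
  set L := a.length with hL
  set w := (a.headD []).length with hw
  have hL1 : 1 ≤ L := by
    cases a with
    | nil => exact absurd rfl hne
    | cons x t => simp [hL]
  set z : List Int := List.replicate w 0 with hz
  set temp1 : List (List Int) := a.set 0 z with htemp1
  have hlen1 : temp1.length = L := by rw [htemp1, List.length_set]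
  have hlast : (temp1.getD (temp1.length - 1) []).length = w := by
    rw [List.getD_eq_getElem?_getD, hlen1, htemp1]
    by_cases hL0 : L - 1 = 0
    · rw [hL0, List.getElem?_set_eq_of_lt _ (by omega)]
      simp [hz]
    · rw [List.getElem?_set_ne (by omega)]
      have hlt : L - 1 < a.length := by omega
      rw [List.getElem?_eq_getElem hlt]
      simpa using hrect _ (List.getElem_mem hlt)
  rw [hlast, ← hz, hlen1]
  simp only [List.length_set, hlen1]
  set temp2 : List (List Int) := temp1.set (L - 1) z with htemp2
  have hlen2 : temp2.length = L := by rw [htemp2, List.length_set, hlen1]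
  -- row k of temp2
  have htemp2k : ∀ k : Nat, k < L →
      temp2[k]? = some (if k = 0 ∨ k = L - 1 then z else a.getD k []) := by
    intro k hk
    rw [htemp2, htemp1]
    by_cases hkl : k = L - 1
    · subst hkl
      rw [List.getElem?_set_eq_of_lt _ (by simp [hL]; omega)]
      simp
    · rw [List.getElem?_set_ne (by omega)]
      by_cases hk0 : k = 0
      · subst hk0
        rw [List.getElem?_set_eq_of_lt _ (by omega)]
        simp
      · rw [List.getElem?_set_ne (by omega), if_neg (by tauto)]
        rw [List.getD_eq_getElem _ _ (by omega), List.getElem?_eq_getElem (by omega)]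
  apply List.ext_getElem?
  intro k
  rw [pv_outer_getElem L w (List.range L) List.nodup_range a
        (by intro i hi; simpa [hL] using List.mem_range.mp hi) k]
  rw [pv_setfold_getElem (fun _ row => pvSetEnds row) (List.range' 1 (L - 2))
        (List.nodup_range' ..) temp2
        (by intro i hi; have := List.mem_range'_1.mp hi; omega) k]
  by_cases hk : k < L
  · rw [if_pos (List.mem_range.mpr hk)]
    have hkk : a[k]? = some a[k] := List.getElem?_eq_getElem hk
    rw [hkk, htemp2k k hk]
    have hrowlen : (a[k]).length = w := hrect _ (List.getElem_mem hk)
    have hmem : k ∈ List.range' 1 (L - 2) ↔ (1 ≤ k ∧ k ≤ L - 2 ∧ 2 ≤ L) := by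
      rw [List.mem_range'_1]; omega
    by_cases hb : k = 0 ∨ k = L - 1
    · rw [if_pos hb, if_neg (by rw [hmem]; omega)]
      simp only [Option.map_some]
      unfold pvRowF
      rw [if_pos hb, pv_zeroFold _ w (by omega)]
      have hdrop : a[k].drop w = [] := by
        rw [List.drop_eq_nil_iff]; omega
      rw [hdrop, List.append_nil]
    · rw [if_neg hb, if_pos (by rw [hmem]; omega)]
      simp only [Option.map_some]
      have hgdk : a.getD k [] = a[k] := List.getD_eq_getElem _ _ hk
      unfold pvRowF pvSetEnds
      rw [if_neg hb, pv_interiorFold, hgdk]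
      have hw1' : 1 ≤ w := by
        rcases hw1 with h | h
        · exact h
        · omega
      rw [if_neg (by omega), if_pos (by omega), hrowlen]
  · rw [if_neg (fun h => hk (List.mem_range.mp h))]
    have h1 : a[k]? = none := List.getElem?_eq_none (by omega)
    have h2 : temp2[k]? = none := List.getElem?_eq_none (by omega)
    rw [h1, h2, if_neg (by rw [List.mem_range'_1]; omega)]
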